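-- pv_equiv track=rewrite | github.com/Migue1Andrade/projeto-grafos | src/graphs/algorithms.py | bfs
-- ===== SOURCE A (Python) =====
-- def _extract_neighbors(raw_neighbors):
--     resultado = []
--
--     for item in raw_neighbors:
--         if isinstance(item, tuple):
--             resultado.append(item[0])
--         else:
--             resultado.append(item)
--
--     return resultado
--
-- def bfs(graph, start_node):
--     visitados = set()
--     fila = [start_node]
--     ordem = []
--     camadas = {start_node: 0}
--
--     while fila:
--         node = fila.pop(0)
--         if node not in visitados:
--             visitados.add(node)
--             ordem.append(node)
--
--             vizinhos = _extract_neighbors(graph.get(node, []))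
--             for viz in vizinhos:
--                 if viz not in visitados and viz not in fila:
--                     camadas[viz] = camadas[node] + 1
--                     fila.append(viz)
--
--     return ordem, camadas
-- ===== SOURCE B (Python) =====
-- def bfs(graph, start_node):
--     # Level-order BFS: expand whole frontiers with a seen-set; layer index is the depth.
--     seen = {start_node}
--     frontier = [start_node]
--     ordem = []
--     camadas = {}
--     depth = 0
--     while frontier:
--         nxt = []
--         for node in frontier:
--             ordem.append(node)
--             camadas[node] = depth
--             for viz in graph.get(node, []):
--                 if isinstance(viz, tuple):
--                     viz = viz[0]
--                 if viz not in seen: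
--                     seen.add(viz)
--                     nxt.append(viz)
--         frontier = nxt
--         depth += 1
--     return ordem, camadas
-- ===== Notes on version B (the rewrite author's own statement) =====
-- stated objective: alternative
-- what changed: Replaces the flat pop(0) queue with its 'viz not in fila' list scan and per-discovery camadas[node]+1 arithmetic by level-order frontier expansion: a seen-set, whole-layer passes building the next frontier, and a depth counter.
import Mathlib
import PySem

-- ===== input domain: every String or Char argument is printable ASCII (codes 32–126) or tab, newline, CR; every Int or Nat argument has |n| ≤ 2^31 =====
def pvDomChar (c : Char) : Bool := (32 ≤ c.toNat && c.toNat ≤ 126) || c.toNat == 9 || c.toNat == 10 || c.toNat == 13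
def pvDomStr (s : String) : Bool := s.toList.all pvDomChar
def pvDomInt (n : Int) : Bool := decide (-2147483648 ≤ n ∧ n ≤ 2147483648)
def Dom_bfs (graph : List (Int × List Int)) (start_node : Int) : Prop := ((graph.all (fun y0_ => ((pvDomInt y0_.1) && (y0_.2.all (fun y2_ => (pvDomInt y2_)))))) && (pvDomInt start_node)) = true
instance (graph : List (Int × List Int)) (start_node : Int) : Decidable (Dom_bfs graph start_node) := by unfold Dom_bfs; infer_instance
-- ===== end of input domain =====

-- B re-implements the flat pop(0)-queue BFS as level-order frontier expansion with a seen-set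
-- (no pop(0), no 'viz not in fila' queue scan); return value proved equal on all inputs.

-- ===== PORT A =====
-- _extract_neighbors: at this type the neighbors are Ints, so the isinstance(tuple) branch
-- is dead and each item is appended unchanged.
def extractNeighbors (raw_neighbors : List Int) : List Int :=
  raw_neighbors.foldl (fun resultado item => resultado ++ [item]) []

-- one step of A's inner 'for viz in vizinhos' loop; state = (camadas, fila after the pop)
def stepA (visitados : PySem.Set Int) (node : Int)
    (st : PySem.Dict Int Int × List Int) (viz : Int) : PySem.Dict Int Int × List Int :=
  if !(PySem.Set.contains visitados viz) && !(st.2.contains viz) then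
    -- camadas[node] is always present when node is popped (set at enqueue time); default 0 is never used
    (st.1.insert viz (st.1.getD node 0 + 1), st.2 ++ [viz])
  else st

-- A's 'while fila' loop; fuel is a totality guard only (≥ total number of pops, proved sufficient)
def bfsLoopA (graph : List (Int × List Int)) :
    Nat → PySem.Set Int → List Int → List Int → PySem.Dict Int Int → List Int × List (Int × Int)
  | 0, _, _, ordem, camadas => (ordem, camadas.items)
  | fuel + 1, visitados, fila, ordem, camadas =>
    match fila with
    | [] => (ordem, camadas.items)
    | node :: fila' =>
      if PySem.Set.contains visitados node then
        bfsLoopA graph fuel visitados fila' ordem camadas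
      else
        let visitados' := PySem.Set.add visitados node
        let ordem' := ordem ++ [node]
        let vizinhos := extractNeighbors ((PySem.Dict.mk graph).getD node [])
        let st := vizinhos.foldl (stepA visitados' node) (camadas, fila')
        bfsLoopA graph fuel visitados' st.2 ordem' st.1

def bfs (graph : List (Int × List Int)) (start_node : Int) : List Int × (List (Int × Int)) :=
  bfsLoopA graph ((graph.map (fun p => p.2.length)).sum + 1)
    PySem.Set.empty [start_node] [] (PySem.Dict.mk [(start_node, 0)])

-- ===== PORT B =====
-- one step of B's inner neighbor loop; state = (seen, nxt)
def stepB (q : PySem.Set Int × List Int) (viz : Int) : PySem.Set Int × List Int :=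
  if !(PySem.Set.contains q.1 viz) then (PySem.Set.add q.1 viz, q.2 ++ [viz]) else q

-- B's body of 'for node in frontier'; state = (ordem, camadas, seen, nxt);
-- the isinstance(tuple) normalization is the identity at this type.
def visitB (graph : List (Int × List Int)) (depth : Int)
    (st : List Int × PySem.Dict Int Int × PySem.Set Int × List Int) (node : Int) :
    List Int × PySem.Dict Int Int × PySem.Set Int × List Int :=
  let inner := ((PySem.Dict.mk graph).getD node []).foldl stepB (st.2.2.1, st.2.2.2)
  (st.1 ++ [node], st.2.1.insert node depth, inner.1, inner.2)

-- B's 'while frontier' loop; same totality fuel (≥ number of layers)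
def bfsLoopB (graph : List (Int × List Int)) :
    Nat → PySem.Set Int → List Int → Int → List Int → PySem.Dict Int Int → List Int × List (Int × Int)
  | 0, _, _, _, ordem, camadas => (ordem, camadas.items)
  | fuel + 1, seen, frontier, depth, ordem, camadas =>
    match frontier with
    | [] => (ordem, camadas.items)
    | _ :: _ =>
      let st := frontier.foldl (visitB graph depth) (ordem, camadas, seen, [])
      bfsLoopB graph fuel st.2.2.1 st.2.2.2 (depth + 1) st.1 st.2.1

def bfs_alt (graph : List (Int × List Int)) (start_node : Int) : List Int × (List (Int × Int)) :=
  bfsLoopB graph ((graph.map (fun p => p.2.length)).sum + 1)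
    (PySem.Set.add PySem.Set.empty start_node) [start_node] 0 [] PySem.Dict.empty


-- ===== PRECONDITION & SPEC =====
def Spec_bfs (graph : List (Int × List Int)) (start_node : Int) (out : List Int × (List (Int × Int))) : Prop := out = bfs_alt graph start_node
instance (graph : List (Int × List Int)) (start_node : Int) (out : List Int × (List (Int × Int))) : Decidable (Spec_bfs graph start_node out) := by unfold Spec_bfs; infer_instance

-- ===== CLAIM (what is proved, stated in full; the proofs are below) =====
def Claim_equal_bfs : Prop := ∀ (graph : List (Int × List Int)) (start_node : Int), Dom_bfs graph start_node → Spec_bfs graph start_node (bfs graph start_node)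

-- ===== LEMMAS AND PROOFS =====


def pend (graph : List (Int × List Int)) (vis : List Int) : Nat :=
  ((graph.filter (fun p => !(vis.contains p.1))).map (fun p => p.2.length)).sum

lemma extract_id (raw : List Int) : extractNeighbors raw = raw := by
  unfold extractNeighbors
  simpa using PySem.List.foldl_append_singleton raw []

lemma dict_get?_append (l1 l2 : List (Int × Int)) (k : Int) :
    (PySem.Dict.mk (l1 ++ l2)).get? k = ((PySem.Dict.mk l1).get? k).or ((PySem.Dict.mk l2).get? k) := by
  induction l1 with
  | nil => simp [PySem.Dict.get?]
  | cons p l1 ih =>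
    cases p with
    | mk a b =>
      simp only [List.cons_append, PySem.Dict.get?_mk_cons, ih]
      split <;> simp

lemma pend_nil_graph (vis : List Int) : pend [] vis = 0 := by simp [pend]

lemma pend_cons (k : Int) (ad : List Int) (g : List (Int × List Int)) (vis : List Int) :
    pend ((k, ad) :: g) vis = (if k ∈ vis then 0 else ad.length) + pend g vis := by
  simp only [pend, List.filter_cons, List.contains_eq_mem]
  split <;> simp_all

lemma pend_mono (graph : List (Int × List Int)) (vis vis' : List Int)
    (h : ∀ x ∈ vis, x ∈ vis') : pend graph vis' ≤ pend graph vis := by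
  induction graph with
  | nil => simp [pend_nil_graph]
  | cons p g ih =>
    cases p with
    | mk k ad =>
      rw [pend_cons, pend_cons]
      by_cases h1 : k ∈ vis
      · simp [h1, h _ h1]; omega
      · by_cases h2 : k ∈ vis' <;> simp [h1, h2] <;> omega

lemma pend_drop (graph : List (Int × List Int)) (vis : List Int) (n : Int) (h : n ∉ vis) :
    ((PySem.Dict.mk graph).getD n []).length + pend graph (vis ++ [n]) ≤ pend graph vis := by
  induction graph with
  | nil => simp [pend_nil_graph, PySem.Dict.getD_eq_get?_getD, PySem.Dict.get?]
  | cons p g ih =>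
    cases p with
    | mk k ad =>
      rw [PySem.Dict.getD_eq_get?_getD] at *
      simp only [PySem.Dict.get?_mk_cons]
      rw [pend_cons, pend_cons]
      by_cases hk : k = n
      · subst hk
        have hmono := pend_mono g vis (vis ++ [k]) (by intro x hx; simp [hx])
        have hkv : k ∉ vis := h
        simp only [beq_self_eq_true, if_true, Option.getD_some, hkv, List.mem_append, List.mem_singleton, reduceIte]
        simp [hkv]
        omega
      · have hb : (k == n) = false := by simp [hk]
        rw [hb]
        simp only [Bool.false_eq_true, if_false]
        have hkn : (k ∈ vis ++ [n]) ↔ k ∈ vis := by simp [hk]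
        by_cases hkv : k ∈ vis <;> simp [hkv, hkn] <;> omega

lemma pend_empty (graph : List (Int × List Int)) :
    pend graph [] = (graph.map (fun p => p.2.length)).sum := by
  simp [pend]

lemma inner_fold (vis' : PySem.Set Int) (node : Int) (d : Int) (base : List (Int × Int)) (F' : List Int)
    (hbase : ∀ x ∈ base.map Prod.fst, x ∈ vis')
    (hnode : (PySem.Dict.mk base).get? node = some d) :
    ∀ (ns : List Int) (seen : PySem.Set Int) (nxt : List Int),
    (∀ x : Int, x ∈ seen ↔ x ∈ vis' ∨ x ∈ F' ++ nxt) →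
    (F' ++ nxt).Nodup →
    (∀ x ∈ F' ++ nxt, x ∉ vis') →
    (ns.foldl (stepA vis' node)
        (PySem.Dict.mk (base ++ F'.map (fun x => (x, d)) ++ nxt.map (fun x => (x, d + 1))), F' ++ nxt)
      = (PySem.Dict.mk (base ++ F'.map (fun x => (x, d)) ++ (ns.foldl stepB (seen, nxt)).2.map (fun x => (x, d + 1))),
         F' ++ (ns.foldl stepB (seen, nxt)).2))
    ∧ (∀ x : Int, x ∈ (ns.foldl stepB (seen, nxt)).1 ↔ x ∈ vis' ∨ x ∈ F' ++ (ns.foldl stepB (seen, nxt)).2)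
    ∧ (F' ++ (ns.foldl stepB (seen, nxt)).2).Nodup
    ∧ (∀ x ∈ F' ++ (ns.foldl stepB (seen, nxt)).2, x ∉ vis')
    ∧ (ns.foldl stepB (seen, nxt)).2.length ≤ nxt.length + ns.length := by
  intro ns
  induction ns with
  | nil =>
    intro seen nxt hseen hnd hfresh
    exact ⟨rfl, hseen, hnd, hfresh, by simp⟩
  | cons v ns ih =>
    intro seen nxt hseen hnd hfresh
    simp only [List.foldl_cons]
    by_cases hv : v ∈ vis' ∨ v ∈ F' ++ nxt
    · -- already seen: both steps are the identity
      have hm : v ∈ seen := (hseen v).2 hv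
      have hgB : stepB (seen, nxt) v = (seen, nxt) := by
        have hne : ¬ ((!(PySem.Set.contains seen v)) = true) := by
          simp only [PySem.Set.contains_eq_listContains, List.contains_eq_mem,
            Bool.not_eq_true', decide_eq_false_iff_not, Decidable.not_not]
          exact hm
        simp only [stepB, if_neg hne]
      have hgA : stepA vis' node
          (PySem.Dict.mk (base ++ F'.map (fun x => (x, d)) ++ nxt.map (fun x => (x, d + 1))), F' ++ nxt) v
          = (PySem.Dict.mk (base ++ F'.map (fun x => (x, d)) ++ nxt.map (fun x => (x, d + 1))), F' ++ nxt) := by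
        have hne : ¬ ((!(PySem.Set.contains vis' v) && !((F' ++ nxt).contains v)) = true) := by
          simp only [PySem.Set.contains_eq_listContains, List.contains_eq_mem, Bool.and_eq_true,
            Bool.not_eq_true', decide_eq_false_iff_not]
          tauto
        simp only [stepA, if_neg hne]
      rw [hgA, hgB]
      have h := ih seen nxt hseen hnd hfresh
      refine ⟨h.1, h.2.1, h.2.2.1, h.2.2.2.1, by have := h.2.2.2.2; simp only [List.length_cons]; omega⟩
    · -- new node: both sides append v
      push_neg at hv
      obtain ⟨hv1, hv2⟩ := hv
      have hs : v ∉ seen := by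
        intro hs
        rcases (hseen v).1 hs with h | h
        · exact hv1 h
        · exact hv2 h
      have hgB : stepB (seen, nxt) v = (seen ++ [v], nxt ++ [v]) := by
        have hyes : ((!(PySem.Set.contains seen v)) = true) := by
          simp only [PySem.Set.contains_eq_listContains, List.contains_eq_mem,
            Bool.not_eq_true', decide_eq_false_iff_not]
          exact hs
        simp only [stepB, if_pos hyes, PySem.Set.add_of_not_mem hs]
      have hlook : (PySem.Dict.mk (base ++ F'.map (fun x => (x, d)) ++ nxt.map (fun x => (x, d + 1)))).getD node 0 = d := by
        rw [PySem.Dict.getD_eq_get?_getD, List.append_assoc, dict_get?_append, hnode]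
        rfl
      have hkeys : (PySem.Dict.mk (base ++ F'.map (fun x => (x, d)) ++ nxt.map (fun x => (x, d + 1)))).contains v = false := by
        rw [← Bool.not_eq_true, PySem.Dict.contains_iff_mem_keys]
        simp only [PySem.Dict.keys_mk, List.map_append, List.map_map, List.mem_append]
        intro hmem
        rcases hmem with (hmem | hmem) | hmem
        · exact hv1 (hbase v hmem)
        · simp at hmem; exact hv2 (List.mem_append.mpr (Or.inl hmem))
        · simp at hmem; exact hv2 (List.mem_append.mpr (Or.inr hmem))
      have hgA : stepA vis' node
          (PySem.Dict.mk (base ++ F'.map (fun x => (x, d)) ++ nxt.map (fun x => (x, d + 1))), F' ++ nxt) v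
          = (PySem.Dict.mk (base ++ F'.map (fun x => (x, d)) ++ (nxt ++ [v]).map (fun x => (x, d + 1))),
             F' ++ (nxt ++ [v])) := by
        have hyes : ((!(PySem.Set.contains vis' v) && !((F' ++ nxt).contains v)) = true) := by
          simp only [PySem.Set.contains_eq_listContains, List.contains_eq_mem, Bool.and_eq_true,
            Bool.not_eq_true', decide_eq_false_iff_not]
          exact ⟨hv1, hv2⟩
        simp only [stepA, if_pos hyes, hlook]
        rw [Prod.mk.injEq]
        refine ⟨?_, by simp [List.append_assoc]⟩
        apply PySem.Dict.ext
        rw [PySem.Dict.items_insert_of_not_contains _ _ hkeys]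
        simp [List.append_assoc]
      rw [hgA, hgB]
      have hseen' : ∀ x : Int, x ∈ seen ++ [v] ↔ x ∈ vis' ∨ x ∈ F' ++ (nxt ++ [v]) := by
        intro x
        simp only [List.mem_append, List.mem_singleton]
        have := hseen x
        simp only [List.mem_append] at this
        tauto
      have hnd' : (F' ++ (nxt ++ [v])).Nodup := by
        rw [← List.append_assoc, ← List.concat_eq_append]
        exact List.Nodup.concat hv2 hnd
      have hfresh' : ∀ x ∈ F' ++ (nxt ++ [v]), x ∉ vis' := by
        intro x hx
        rw [← List.append_assoc] at hx
        rcases List.mem_append.mp hx with hx | hx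
        · exact hfresh x hx
        · simp only [List.mem_singleton] at hx; subst hx; exact hv1
      have h := ih (seen ++ [v]) (nxt ++ [v]) hseen' hnd' hfresh'
      refine ⟨h.1, h.2.1, h.2.2.1, h.2.2.2.1, ?_⟩
      have hlen := h.2.2.2.2
      simp only [List.length_append, List.length_cons] at hlen ⊢
      simp at hlen
      omega

lemma layer_fold (graph : List (Int × List Int)) (d : Int) :
    ∀ (F : List Int) (fuelA : Nat) (vis seen : PySem.Set Int) (nxt ordem : List Int) (base : List (Int × Int)),
    (∀ x ∈ base.map Prod.fst, x ∈ vis) →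
    (∀ x : Int, x ∈ seen ↔ x ∈ vis ∨ x ∈ F ++ nxt) →
    (F ++ nxt).Nodup →
    (∀ x ∈ F ++ nxt, x ∉ vis) →
    (bfsLoopA graph (fuelA + F.length) vis (F ++ nxt) ordem
        (PySem.Dict.mk (base ++ F.map (fun x => (x, d)) ++ nxt.map (fun x => (x, d + 1))))
      = bfsLoopA graph fuelA (PySem.Set.update vis F)
          (F.foldl (visitB graph d) (ordem, PySem.Dict.mk base, seen, nxt)).2.2.2
          (F.foldl (visitB graph d) (ordem, PySem.Dict.mk base, seen, nxt)).1
          (PySem.Dict.mk ((F.foldl (visitB graph d) (ordem, PySem.Dict.mk base, seen, nxt)).2.1.items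
             ++ ((F.foldl (visitB graph d) (ordem, PySem.Dict.mk base, seen, nxt)).2.2.2).map (fun x => (x, d + 1)))))
    ∧ (F.foldl (visitB graph d) (ordem, PySem.Dict.mk base, seen, nxt)).1 = ordem ++ F
    ∧ (∀ x : Int, x ∈ (F.foldl (visitB graph d) (ordem, PySem.Dict.mk base, seen, nxt)).2.2.1 ↔
        x ∈ PySem.Set.update vis F ∨ x ∈ (F.foldl (visitB graph d) (ordem, PySem.Dict.mk base, seen, nxt)).2.2.2)
    ∧ ((F.foldl (visitB graph d) (ordem, PySem.Dict.mk base, seen, nxt)).2.1.items.map Prod.fst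
        = base.map Prod.fst ++ F)
    ∧ ((F.foldl (visitB graph d) (ordem, PySem.Dict.mk base, seen, nxt)).2.2.2).Nodup
    ∧ (∀ x ∈ (F.foldl (visitB graph d) (ordem, PySem.Dict.mk base, seen, nxt)).2.2.2, x ∉ PySem.Set.update vis F)
    ∧ (F.foldl (visitB graph d) (ordem, PySem.Dict.mk base, seen, nxt)).2.2.2.length
        + pend graph (PySem.Set.update vis F) ≤ nxt.length + pend graph vis := by
  intro F
  induction F with
  | nil =>
    intro fuelA vis seen nxt ordem base hbase hseen hnd hfresh
    refine ⟨?_, by simp, ?_, by simp, ?_, ?_, ?_⟩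
    · simp [PySem.Set.update_nil]
    · intro x
      simpa [PySem.Set.update_nil] using hseen x
    · simpa using hnd
    · intro x hx
      simp only [PySem.Set.update_nil]
      exact hfresh x (by simpa using hx)
    · simp [PySem.Set.update_nil]
  | cons f0 F' ih =>
    intro fuelA vis seen nxt ordem base hbase hseen hnd hfresh
    have hf0vis : f0 ∉ vis := hfresh f0 (by simp)
    have hf0keys : f0 ∉ base.map Prod.fst := fun h => hf0vis (hbase f0 h)
    have hadd : PySem.Set.add vis f0 = vis ++ [f0] := PySem.Set.add_of_not_mem hf0vis
    -- A makes one pop of f0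
    have hvc : ¬ (PySem.Set.contains vis f0 = true) := by
      simp only [PySem.Set.contains_eq_listContains, List.contains_eq_mem, decide_eq_true_eq]
      exact hf0vis
    have hnode : (PySem.Dict.mk (base ++ [(f0, d)])).get? f0 = some d := by
      rw [dict_get?_append]
      have : (PySem.Dict.mk base).get? f0 = none := by
        rw [PySem.Dict.get?_eq_none_iff_not_mem_keys, PySem.Dict.keys_mk]
        exact hf0keys
      rw [this]
      simp [PySem.Dict.get?_mk_cons]
    have hbase' : ∀ x ∈ (base ++ [(f0, d)]).map Prod.fst, x ∈ vis ++ [f0] := by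
      intro x hx
      simp only [List.map_append, List.mem_append] at hx
      rcases hx with hx | hx
      · exact List.mem_append.mpr (Or.inl (hbase x hx))
      · simp at hx; simp [hx]
    have hseen0 : ∀ x : Int, x ∈ seen ↔ x ∈ vis ++ [f0] ∨ x ∈ F' ++ nxt := by
      intro x
      have := hseen x
      simp only [List.cons_append, List.mem_cons, List.mem_append] at this ⊢
      tauto
    have hnd0 : (F' ++ nxt).Nodup := by
      have := hnd
      simp only [List.cons_append, List.nodup_cons] at this
      exact this.2
    have hf0notrest : f0 ∉ F' ++ nxt := by
      have := hnd
      simp only [List.cons_append, List.nodup_cons] at this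
      exact this.1
    have hfresh0 : ∀ x ∈ F' ++ nxt, x ∉ vis ++ [f0] := by
      intro x hx
      simp only [List.mem_append, List.mem_singleton]
      push_neg
      exact ⟨hfresh x (by simp only [List.cons_append, List.mem_cons]; right; exact (List.mem_append.mp hx).elim (fun h => List.mem_append.mpr (Or.inl h)) (fun h => List.mem_append.mpr (Or.inr h))), fun h => hf0notrest (h ▸ hx)⟩
    have hinner := inner_fold (vis ++ [f0]) f0 d (base ++ [(f0, d)]) F' hbase' hnode
      ((PySem.Dict.mk graph).getD f0 []) seen nxt hseen0 hnd0 hfresh0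
    -- name the inner-fold (B side) result
    set q := (((PySem.Dict.mk graph).getD f0 []).foldl stepB (seen, nxt)) with hq
    obtain ⟨hA1, hS1, hN1, hF1, hL1⟩ := hinner
    -- unfold one step of A
    have hstepA : bfsLoopA graph (fuelA + (f0 :: F').length) vis ((f0 :: F') ++ nxt) ordem
        (PySem.Dict.mk (base ++ (f0 :: F').map (fun x => (x, d)) ++ nxt.map (fun x => (x, d + 1))))
        = bfsLoopA graph (fuelA + F'.length) (vis ++ [f0]) (F' ++ q.2) (ordem ++ [f0])
            (PySem.Dict.mk ((base ++ [(f0, d)]) ++ F'.map (fun x => (x, d)) ++ q.2.map (fun x => (x, d + 1)))) := by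
      have hfuel : fuelA + (f0 :: F').length = (fuelA + F'.length) + 1 := by simp only [List.length_cons]; omega
      rw [hfuel]
      simp only [List.cons_append, bfsLoopA]
      rw [if_neg hvc]
      simp only [extract_id, hadd]
      have hshape : (PySem.Dict.mk (base ++ ((f0, d) :: F'.map (fun x => (x, d))) ++ nxt.map (fun x => (x, d + 1))))
          = (PySem.Dict.mk ((base ++ [(f0, d)]) ++ F'.map (fun x => (x, d)) ++ nxt.map (fun x => (x, d + 1)))) := by
        apply PySem.Dict.ext
        simp
      simp only [List.map_cons, hshape]
      rw [hA1]
    -- unfold one step of B's layer fold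
    have hvisit : visitB graph d (ordem, PySem.Dict.mk base, seen, nxt) f0
        = (ordem ++ [f0], PySem.Dict.mk (base ++ [(f0, d)]), q.1, q.2) := by
      have hcont : (PySem.Dict.mk base).contains f0 = false := by
        rw [← Bool.not_eq_true, PySem.Dict.contains_iff_mem_keys, PySem.Dict.keys_mk]
        exact hf0keys
      simp only [visitB, ← hq]
      rw [Prod.mk.injEq, Prod.mk.injEq, Prod.mk.injEq]
      refine ⟨rfl, ?_, rfl, rfl⟩
      apply PySem.Dict.ext
      rw [PySem.Dict.items_insert_of_not_contains _ _ hcont]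
    have hih := ih fuelA (vis ++ [f0]) q.1 q.2 (ordem ++ [f0]) (base ++ [(f0, d)]) hbase' hS1 hN1 hF1
    obtain ⟨ihA, ihOrd, ihSeen, ihKeys, ihNd, ihFresh, ihPend⟩ := hih
    have hupd : PySem.Set.update vis (f0 :: F') = PySem.Set.update (vis ++ [f0]) F' := by
      rw [PySem.Set.update_cons, hadd]
    have hfold : (f0 :: F').foldl (visitB graph d) (ordem, PySem.Dict.mk base, seen, nxt)
        = F'.foldl (visitB graph d) (ordem ++ [f0], PySem.Dict.mk (base ++ [(f0, d)]), q.1, q.2) := by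
      rw [List.foldl_cons, hvisit]
    rw [hfold, hupd]
    refine ⟨?_, ?_, ihSeen, ?_, ihNd, ihFresh, ?_⟩
    · rw [hstepA, ihA]
    · rw [ihOrd]; simp
    · rw [ihKeys]; simp
    · have hdrop := pend_drop graph vis f0 hf0vis
      have hlen := hL1
      omega

lemma grand (graph : List (Int × List Int)) :
    ∀ (fuelB fuelA : Nat) (d : Int) (vis seen : PySem.Set Int) (F ordem : List Int) (base : List (Int × Int)),
    (∀ x ∈ base.map Prod.fst, x ∈ vis) →
    (∀ x : Int, x ∈ seen ↔ x ∈ vis ∨ x ∈ F) →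
    F.Nodup →
    (∀ x ∈ F, x ∉ vis) →
    F.length + pend graph vis ≤ fuelA →
    F.length + pend graph vis ≤ fuelB →
    bfsLoopA graph fuelA vis F ordem (PySem.Dict.mk (base ++ F.map (fun x => (x, d))))
      = bfsLoopB graph fuelB seen F d ordem (PySem.Dict.mk base) := by
  intro fuelB
  induction fuelB with
  | zero =>
    intro fuelA d vis seen F ordem base hbase hseen hnd hfresh hfA hfB
    have hF : F = [] := by
      cases F with
      | nil => rfl
      | cons a l => simp only [List.length_cons] at hfB; omega
    subst hF
    cases fuelA <;> simp [bfsLoopA, bfsLoopB]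
  | succ fuelB ih =>
    intro fuelA d vis seen F ordem base hbase hseen hnd hfresh hfA hfB
    cases F with
    | nil => cases fuelA <;> simp [bfsLoopA, bfsLoopB]
    | cons f0 F' =>
      have hlenle : (f0 :: F').length ≤ fuelA := by omega
      obtain ⟨fuelA', rfl⟩ : ∃ k, fuelA = k + (f0 :: F').length :=
        ⟨fuelA - (f0 :: F').length, by omega⟩
      have hseen' : ∀ x : Int, x ∈ seen ↔ x ∈ vis ∨ x ∈ (f0 :: F') ++ [] := by
        intro x; simpa using hseen x
      have hnd' : ((f0 :: F') ++ ([] : List Int)).Nodup := by simpa using hnd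
      have hfresh' : ∀ x ∈ (f0 :: F') ++ ([] : List Int), x ∉ vis := by
        intro x hx; exact hfresh x (by simpa using hx)
      have hlayer := layer_fold graph d (f0 :: F') fuelA' vis seen [] ordem base
        hbase hseen' hnd' hfresh'
      obtain ⟨lA, lOrd, lSeen, lKeys, lNd, lFresh, lPend⟩ := hlayer
      set st := ((f0 :: F').foldl (visitB graph d) (ordem, PySem.Dict.mk base, seen, [])) with hst
      -- left side
      simp only [List.append_nil, List.map_nil, List.length_nil] at lA lPend
      have hLHS : bfsLoopA graph (fuelA' + (f0 :: F').length) vis (f0 :: F') ordem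
          (PySem.Dict.mk (base ++ (f0 :: F').map (fun x => (x, d))))
          = bfsLoopA graph fuelA' (PySem.Set.update vis (f0 :: F')) st.2.2.2 st.1
              (PySem.Dict.mk (st.2.1.items ++ st.2.2.2.map (fun x => (x, d + 1)))) := lA
      -- right side: unfold one B layer
      have hRHS : bfsLoopB graph (fuelB + 1) seen (f0 :: F') d ordem (PySem.Dict.mk base)
          = bfsLoopB graph fuelB st.2.2.1 st.2.2.2 (d + 1) st.1 st.2.1 := by
        simp only [bfsLoopB, ← hst]
      rw [hLHS, hRHS]
      have hpvis : pend graph (PySem.Set.update vis (f0 :: F')) ≤ pend graph vis := by omega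
      have hbase2 : ∀ x ∈ st.2.1.items.map Prod.fst, x ∈ PySem.Set.update vis (f0 :: F') := by
        intro x hx
        rw [lKeys] at hx
        rcases List.mem_append.mp hx with hx | hx
        · exact (PySem.Set.mem_update vis (f0 :: F') x).mpr (Or.inl (hbase x hx))
        · exact (PySem.Set.mem_update vis (f0 :: F') x).mpr (Or.inr hx)
      have happ := ih fuelA' (d + 1) (PySem.Set.update vis (f0 :: F')) st.2.2.1 st.2.2.2 st.1
        st.2.1.items hbase2 lSeen lNd lFresh
        (by simp only [List.length_cons] at hfA; omega)
        (by simp only [List.length_cons] at hfB; omega)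
      have heta : PySem.Dict.mk (st.2.1.items) = st.2.1 := rfl
      rw [heta] at happ
      exact happ

-- ===== VERDICT (by name: the statement is the Claim_ definition above) =====

theorem bfs_spec : Claim_equal_bfs := by
  unfold Claim_equal_bfs Spec_bfs
  intro graph start _
  unfold bfs bfs_alt
  have hadd : PySem.Set.add PySem.Set.empty start = [start] :=
    PySem.Set.add_of_not_mem (by simp [PySem.Set.empty])
  rw [hadd]
  have h := grand graph ((graph.map (fun p => p.2.length)).sum + 1)
    ((graph.map (fun p => p.2.length)).sum + 1) 0
    PySem.Set.empty [start] [start] [] []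
    (by simp)
    (by intro x; simp [PySem.Set.empty])
    (by simp)
    (by intro x hx; simp [PySem.Set.empty])
    (by simp [pend_empty]; omega)
    (by simp [pend_empty]; omega)
  simpa [PySem.Dict.empty] using h
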